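-- pv_equiv track=rewrite | github.com/FilipeKN4/Compilador_Lispf_ck_trabalho_05 | lispf_ck_compiler.py | do_before
-- ===== SOURCE A (Python) =====
-- def do_before(command, old_array):
--     new_array = []
--     i = 0
--     while i < len(old_array):
--         new_array.append(command)
--         new_array.append(old_array[i])
--         if old_array[i] == 'add' or old_array[i] == 'sub':
--             i += 1
--             new_array.append(old_array[i])
--         i += 1
--
--     return new_array
-- ===== SOURCE B (Python) =====
-- def do_before(command, old_array):
--     # Phase 1: parse old_array into instruction groups (add/sub take one operand).
--     groups = []
--     i = 0
--     n = len(old_array)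
--     while i < n:
--         tok = old_array[i]
--         if tok == 'add' or tok == 'sub':
--             groups.append([tok, old_array[i + 1]])  # IndexError on trailing add/sub, like a naive reader would
--             i += 2
--         else:
--             groups.append([tok])
--             i += 1
--     # Phase 2: emit command before each group.
--     new_array = []
--     for g in groups:
--         new_array.append(command)
--         new_array.extend(g)
--     return new_array
-- ===== Notes on version B (the rewrite author's own statement) =====
-- stated objective: alternative
-- what changed: B replaces A's single interleaved while-loop by a two-phase shape: first a parsing pass that groups each token (with its operand for 'add'/'sub') into a list of instruction groups, then an emit pass that prepends command to each group.
import Mathlib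
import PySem

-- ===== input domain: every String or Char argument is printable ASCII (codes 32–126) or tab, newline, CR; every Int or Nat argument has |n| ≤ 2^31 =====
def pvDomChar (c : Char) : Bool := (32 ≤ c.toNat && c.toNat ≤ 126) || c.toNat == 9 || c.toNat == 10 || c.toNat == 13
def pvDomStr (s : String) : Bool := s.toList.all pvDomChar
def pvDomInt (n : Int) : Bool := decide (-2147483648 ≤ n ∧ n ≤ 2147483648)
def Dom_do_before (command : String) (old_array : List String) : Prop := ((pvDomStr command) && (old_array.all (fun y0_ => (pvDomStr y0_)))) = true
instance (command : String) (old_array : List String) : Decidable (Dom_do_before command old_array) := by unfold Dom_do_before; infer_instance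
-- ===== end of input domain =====

-- B restructures A's single interleaved while-loop into two phases — parse tokens into
-- instruction groups (an 'add'/'sub' takes the following operand), then emit command
-- before each group — same return value, same cost (objective: alternative).

-- ===== PORT A =====
-- A's while loop: index i and accumulator new_array; 'none' = Python's IndexError at old_array[i+1].
def doBeforeLoopA (command : String) (old_array : List String) (i : Nat) (acc : List String) :
    Option (List String) :=
  if h : i < old_array.length then
    if old_array[i] = "add" ∨ old_array[i] = "sub" then
      match PySem.List.pyGet? old_array ((i : Int) + 1) with
      | none => none
      | some t => doBeforeLoopA command old_array (i + 2) (acc ++ [command, old_array[i]] ++ [t])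
    else
      doBeforeLoopA command old_array (i + 1) (acc ++ [command, old_array[i]])
  else
    some acc
termination_by old_array.length - i

def do_before (command : String) (old_array : List String) : List String :=
  (doBeforeLoopA command old_array 0 []).getD []

-- ===== PORT B =====
-- Phase 1 of Source B: parse old_array into instruction groups; 'none' = IndexError at old_array[i+1].
def parseGroups (old_array : List String) (i : Nat) : Option (List (List String)) :=
  if h : i < old_array.length then
    if old_array[i] = "add" ∨ old_array[i] = "sub" then
      match PySem.List.pyGet? old_array ((i : Int) + 1) with
      | none => none
      | some t => (parseGroups old_array (i + 2)).map (fun gs => [old_array[i], t] :: gs)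
    else
      (parseGroups old_array (i + 1)).map (fun gs => [old_array[i]] :: gs)
  else
    some []
termination_by old_array.length - i

-- Phase 2 of Source B: command before each group.
def emitGroups (command : String) (groups : List (List String)) : List String :=
  groups.foldl (fun out g => out ++ command :: g) []

def do_before_alt (command : String) (old_array : List String) : List String :=
  match parseGroups old_array 0 with
  | none => []
  | some gs => emitGroups command gs

-- ===== PRECONDITION & SPEC =====
-- Pre_ excludes exactly the inputs on which the Python A raises IndexError: a greedy scan
-- hitting an 'add'/'sub' as the last remaining token; wfTokens is that well-formedness scan.
def wfTokens : List String → Bool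
  | [] => true
  | x :: rest =>
    if x = "add" ∨ x = "sub" then
      match rest with
      | [] => false
      | _ :: rest' => wfTokens rest'
    else wfTokens rest

def Pre_do_before (command : String) (old_array : List String) : Prop :=
  wfTokens old_array = true

instance (command : String) (old_array : List String) : Decidable (Pre_do_before command old_array) := by
  unfold Pre_do_before; infer_instance

def pvWitness_do_before : String × List String := ("mov", ["add", "3", "x", "sub", "y"])

def Spec_do_before (command : String) (old_array : List String) (out : List String) : Prop := out = do_before_alt command old_array
instance (command : String) (old_array : List String) (out : List String) : Decidable (Spec_do_before command old_array out) := by unfold Spec_do_before; infer_instance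

-- ===== CLAIM (what is proved, stated in full; the proofs are below) =====
def Claim_equal_do_before : Prop := ∀ (command : String) (old_array : List String), Dom_do_before command old_array → Pre_do_before command old_array → Spec_do_before command old_array (do_before command old_array)

-- ===== LEMMAS AND PROOFS =====
-- A's loop from index i equals B's parse-from-i followed by the emit fold started at acc.
lemma doBeforeLoopA_eq (command : String) (old_array : List String) (i : Nat) (acc : List String) :
    doBeforeLoopA command old_array i acc =
      (parseGroups old_array i).map
        (fun gs => gs.foldl (fun out g => out ++ command :: g) acc) := by
  fun_induction doBeforeLoopA command old_array i acc
  case case1 i acc h hor hget =>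
    rw [parseGroups, dif_pos h, if_pos hor, hget]; rfl
  case case2 i acc h hor t hget ih =>
    rw [parseGroups, dif_pos h, if_pos hor, hget, ih]
    cases parseGroups old_array (i + 2) <;> simp
  case case3 i acc h hor ih =>
    rw [parseGroups, dif_pos h, if_neg hor, ih]
    cases parseGroups old_array (i + 1) <;> simp
  case case4 i acc h =>
    rw [parseGroups, dif_neg h]; simp

-- ===== VERDICT (by name: the statement is the Claim_ definition above) =====
theorem do_before_spec : Claim_equal_do_before := by
  intro command old_array _ _
  unfold Spec_do_before do_before do_before_alt emitGroups
  rw [doBeforeLoopA_eq]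
  cases parseGroups old_array 0 <;> simp
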